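-- pv_equiv track=rewrite | github.com/undefinedtv/undefiendtv | rectvorjinal.py | extract_entries
-- ===== SOURCE A (Python) =====
-- def extract_entries(lines):
--     entries = []
--     temp = []
--     for line in lines:
--         if line.startswith("#EXTINF:"):
--             if temp:
--                 entries.append(tuple(temp))
--                 temp = []
--             temp = [line]
--         elif temp:
--             temp.append(line)
--     if temp:
--         entries.append(tuple(temp))
--     return entries
-- ===== SOURCE B (Python) =====
-- def extract_entries(lines):
--     lines = list(lines)
--     marks = [i for i, line in enumerate(lines) if line.startswith("#EXTINF:")]
--     ends = marks[1:] + [len(lines)]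
--     return [tuple(lines[s:e]) for s, e in zip(marks, ends)]
-- ===== Notes on version B (the rewrite author's own statement) =====
-- stated objective: alternative
-- what changed: B first builds an index table of the #EXTINF marker positions and then emits each entry as a slice from one marker up to the next (or the end), replacing A's running temp-buffer with flush-on-next-marker/flush-at-end logic by staged passes over an index table.
import Mathlib
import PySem

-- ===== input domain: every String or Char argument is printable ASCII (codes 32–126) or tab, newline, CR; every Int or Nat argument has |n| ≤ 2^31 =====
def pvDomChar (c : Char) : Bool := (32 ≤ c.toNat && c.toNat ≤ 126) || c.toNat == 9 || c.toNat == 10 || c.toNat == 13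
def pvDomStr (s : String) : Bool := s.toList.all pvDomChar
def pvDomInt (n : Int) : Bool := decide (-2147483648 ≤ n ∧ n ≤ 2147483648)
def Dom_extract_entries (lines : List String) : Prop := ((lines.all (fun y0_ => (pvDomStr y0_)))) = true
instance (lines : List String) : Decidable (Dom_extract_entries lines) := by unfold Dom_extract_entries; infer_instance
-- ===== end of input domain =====

-- B replaces A's running temp-buffer/flush logic by staged passes: an index table of #EXTINF marker positions, then one slice per marker up to the next marker (or the end); alternative decomposition, same O(n) cost.


-- ===== PORT A =====
-- line.startswith("#EXTINF:"), the marker test both programs share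
def pvMark (line : String) : Bool := PySem.Str.startswith line "#EXTINF:"

-- one loop iteration of A: state (entries, temp)
def pvStepA (st : List (List String) × List String) (line : String) :
    List (List String) × List String :=
  if pvMark line then
    (if st.2 ≠ [] then st.1 ++ [st.2] else st.1, [line])
  else if st.2 ≠ [] then (st.1, st.2 ++ [line])
  else (st.1, st.2)

def extract_entries (lines : List String) : List (List String) :=
  let st := lines.foldl pvStepA ([], [])
  if st.2 ≠ [] then st.1 ++ [st.2] else st.1

-- ===== PORT B =====
-- Source B: marker-index table, then a slice from each marker to the next (or to len(lines))
def extract_entries_alt (lines : List String) : List (List String) :=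
  let marks := ((PySem.List.enumerate lines).filter (fun p => pvMark p.2)).map (fun p => p.1)
  let ends := marks.tail ++ [(lines.length : Int)]
  (marks.zip ends).map (fun se => PySem.List.slice lines (some se.1) (some se.2))

-- ===== PRECONDITION & SPEC =====
def Spec_extract_entries (lines : List String) (out : List (List String)) : Prop := out = extract_entries_alt lines
instance (lines : List String) (out : List (List String)) : Decidable (Spec_extract_entries lines out) := by unfold Spec_extract_entries; infer_instance

-- ===== CLAIM (what is proved, stated in full; the proofs are below) =====
def Claim_equal_extract_entries : Prop := ∀ (lines : List String), Dom_extract_entries lines → Spec_extract_entries lines (extract_entries lines)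

-- ===== LEMMAS AND PROOFS =====

-- reference recursion: entries of `ls` given an open group `temp`
def pvCont (temp : List String) : List String → List (List String)
  | [] => if temp ≠ [] then [temp] else []
  | l :: ls =>
    if pvMark l then
      if temp ≠ [] then temp :: pvCont [l] ls else pvCont [l] ls
    else if temp ≠ [] then pvCont (temp ++ [l]) ls
    else pvCont [] ls

-- A's loop, flushed, equals `entries` so far plus the entries contributed by `rest` given open group `temp`
theorem pvA_cont (rest : List String) :
    ∀ (es : List (List String)) (temp : List String),
    (let st := rest.foldl pvStepA (es, temp);
     if st.2 ≠ [] then st.1 ++ [st.2] else st.1) = es ++ pvCont temp rest := by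
  induction rest with
  | nil =>
    intro es temp
    simp only [List.foldl, pvCont]
    split <;> simp
  | cons l rest ih =>
    intro es temp
    simp only [List.foldl, pvCont, pvStepA]
    by_cases h : pvMark l
    · by_cases ht : temp ≠ [] <;>
        simp [h, ht, ih, List.append_assoc]
    · by_cases ht : temp ≠ []
      · simp [h, ht, ih]
      · obtain rfl : temp = [] := not_not.mp ht
        simp [h, ih]

-- a nonempty open group closes with the marker-free prefix, then the rest's entries follow
theorem pvCont_ne (ls : List String) : ∀ (temp : List String), temp ≠ [] →
    pvCont temp ls = (temp ++ ls.takeWhile (fun l => !pvMark l)) :: pvCont [] ls := by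
  induction ls with
  | nil => intro temp ht; simp [pvCont, ht]
  | cons x xs ihx =>
    intro temp ht
    by_cases hx : pvMark x
    · simp [pvCont, hx, ht, List.takeWhile]
    · simp [pvCont, hx, ht, List.takeWhile, ihx (temp ++ [x]) (by simp)]

-- Nat-level marker-index table
def pvMarks : List String → List Nat
  | [] => []
  | l :: ls => if pvMark l then 0 :: (pvMarks ls).map (· + 1) else (pvMarks ls).map (· + 1)

-- B's filtered enumeration is the Nat table, cast and shifted by the start offset
theorem pvMarks_enum (ls : List String) : ∀ (s : Int),
    ((PySem.List.enumerate ls s).filter (fun p => pvMark p.2)).map (fun p => p.1)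
      = (pvMarks ls).map (fun (k : Nat) => s + (k : Int)) := by
  induction ls with
  | nil => intro s; simp [PySem.List.enumerate_nil, pvMarks]
  | cons l ls ih =>
    intro s
    rw [PySem.List.enumerate_cons]
    by_cases h : pvMark l
    · rw [List.filter_cons_of_pos (by simpa using h), List.map_cons, ih (s + 1)]
      simp only [pvMarks, if_pos h, List.map_cons, List.map_map, Nat.cast_zero, add_zero]
      refine congrArg _ ?_
      exact List.map_congr_left fun k _ => by simp [Function.comp]; ring
    · rw [List.filter_cons_of_neg (by simpa using h), ih (s + 1)]
      simp only [pvMarks, if_neg h, List.map_map]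
      exact List.map_congr_left fun k _ => by simp [Function.comp]; ring

-- a marker-free list contributes nothing and is swallowed by takeWhile
theorem pvMarks_nil (ls : List String) (h : pvMarks ls = []) :
    ls.takeWhile (fun l => !pvMark l) = ls ∧ pvCont [] ls = [] := by
  induction ls with
  | nil => simp [pvCont]
  | cons l ls ih =>
    by_cases hl : pvMark l
    · simp [pvMarks, hl] at h
    · simp [pvMarks, hl] at h
      obtain ⟨h1, h2⟩ := ih h
      simp [List.takeWhile, hl, h1, pvCont, h2]

-- the first marker index bounds the open prefix
theorem pvMarks_head (ls : List String) : ∀ (m : Nat) (ms : List Nat),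
    pvMarks ls = m :: ms → ls.takeWhile (fun l => !pvMark l) = ls.take m := by
  induction ls with
  | nil => intro m ms h; simp [pvMarks] at h
  | cons l ls ih =>
    intro m ms h
    by_cases hl : pvMark l
    · simp [pvMarks, hl] at h
      simp [List.takeWhile, hl, ← h.1]
    · simp only [pvMarks, if_neg hl] at h
      cases hms : pvMarks ls with
      | nil => simp [hms] at h
      | cons m' ms' =>
        rw [hms] at h
        simp at h
        simp [List.takeWhile, hl, ih m' ms' hms, ← h.1]

-- Nat-level slice
def pvSliceN (xs : List String) (s e : Nat) : List String := (xs.drop s).take (e - s)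

-- main: the index-table/slicing construction computes pvCont [] at the Nat level
theorem pvB_cont (lines : List String) :
    ((pvMarks lines).zip ((pvMarks lines).tail ++ [lines.length])).map
        (fun p => pvSliceN lines p.1 p.2) = pvCont [] lines := by
  induction lines with
  | nil => simp [pvMarks, pvCont]
  | cons l ls ih =>
    by_cases hl : pvMark l
    · rw [show pvMarks (l :: ls) = 0 :: (pvMarks ls).map (· + 1) by simp [pvMarks, hl]]
      rw [show pvCont [] (l :: ls) = pvCont [l] ls by simp [pvCont, hl]]
      rw [pvCont_ne ls [l] (by simp)]
      cases hms : pvMarks ls with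
      | nil =>
        obtain ⟨h1, h2⟩ := pvMarks_nil ls hms
        simp [pvSliceN, h1, h2, List.take_of_length_le]
      | cons m ms =>
        have htw := pvMarks_head ls m ms hms
        rw [hms] at ih
        simp only [List.map_cons, List.tail_cons, List.zip_cons_cons, List.map_cons,
          List.cons_append, List.length_cons]
        refine congrArg₂ _ ?_ ?_
        · simp [pvSliceN, htw]
        · have hsh : ((m + 1) :: List.map (· + 1) ms).zip (List.map (· + 1) ms ++ [ls.length + 1])
              = ((m :: ms).zip ((m :: ms).tail ++ [ls.length])).map
                  (Prod.map (· + 1) (· + 1)) := by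
            simp [← List.zip_map]
          rw [hsh, List.map_map, ← ih]
          refine List.map_congr_left fun p _ => ?_
          cases p with
          | mk a b => simp [pvSliceN, Function.comp, Nat.succ_sub_succ]
    · rw [show pvMarks (l :: ls) = (pvMarks ls).map (· + 1) by simp [pvMarks, hl]]
      rw [show pvCont [] (l :: ls) = pvCont [] ls by simp [pvCont, hl]]
      have hends : (List.map (· + 1) (pvMarks ls)).tail ++ [(l :: ls).length]
          = ((pvMarks ls).tail ++ [ls.length]).map (· + 1) := by
        cases pvMarks ls <;> simp
      rw [hends, List.zip_map, List.map_map, ← ih]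
      refine List.map_congr_left fun p _ => ?_
      cases p with
      | mk a b => simp [pvSliceN, Function.comp, Nat.succ_sub_succ]

-- Int-level slices over cast pairs are the Nat-level ones
theorem pvSlice_cast (lines : List String) (p : Nat × Nat) :
    PySem.List.slice lines (some (p.1 : Int)) (some (p.2 : Int)) = pvSliceN lines p.1 p.2 := by
  rw [PySem.List.slice_toNat lines (by positivity) (by positivity)]
  simp [pvSliceN]

-- ===== VERDICT (by name: the statement is the Claim_ definition above) =====
theorem extract_entries_spec : Claim_equal_extract_entries := by
  intro lines _
  simp only [Spec_extract_entries, extract_entries, extract_entries_alt]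
  rw [pvMarks_enum lines 0]
  rw [show (pvMarks lines).map (fun (k : Nat) => (0 : Int) + (k : Int))
        = (pvMarks lines).map (fun (k : Nat) => (k : Int)) from
      List.map_congr_left fun k _ => by ring]
  rw [show ((pvMarks lines).map (fun (k : Nat) => (k : Int))).tail ++ [(lines.length : Int)]
        = ((pvMarks lines).tail ++ [lines.length]).map (fun (k : Nat) => (k : Int)) by
      cases pvMarks lines <;> simp]
  rw [List.zip_map, List.map_map]
  rw [show List.map
        ((fun se => PySem.List.slice lines (some se.1) (some se.2)) ∘
          Prod.map (fun (k : Nat) => (k : Int)) (fun (k : Nat) => (k : Int)))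
        ((pvMarks lines).zip ((pvMarks lines).tail ++ [lines.length]))
      = List.map (fun p => pvSliceN lines p.1 p.2)
          ((pvMarks lines).zip ((pvMarks lines).tail ++ [lines.length])) from
    List.map_congr_left fun p _ => pvSlice_cast lines p]
  rw [pvB_cont]
  simpa using pvA_cont lines [] []
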